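-- pv_equiv track=rewrite | github.com/pyenergyplus/eppy3000 | eppy3000/idfjsonconverter.py | removetrailingblanks
-- ===== SOURCE A (Python) =====
-- def removetrailingblanks(lst):
--     """remove railing blanks in lst
--     lst = [(a, b), (a, ''), (b, c), (d, ''), (e, '')]
--     return [(a, b), (a, ''), (b, c)]"""
--     lst.reverse()
--     new_lst = []
--     trailing = True
--     for fst, snd in lst:
--         if trailing:
--             if snd != "":
--                 new_lst.append((fst, snd))
--                 trailing = False
--             else:
--                 pass
--         else:
--             new_lst.append((fst, snd))
--     new_lst.reverse()
--     return new_lst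
-- ===== SOURCE B (Python) =====
-- def removetrailingblanks(lst):
--     """remove railing blanks in lst
--     lst = [(a, b), (a, ''), (b, c), (d, ''), (e, '')]
--     return [(a, b), (a, ''), (b, c)]"""
--     lst.reverse()
--     i = next((k for k, (fst, snd) in enumerate(lst) if snd != ""), len(lst))
--     result = lst[i:]
--     result.reverse()
--     return result
-- ===== Notes on version B (the rewrite author's own statement) =====
-- stated objective: simpler
-- what changed: Replaces the element-by-element boolean-flag accumulator loop with finding the first non-blank cut index in the reversed list and slicing from it; the in-place lst.reverse() side effect is preserved.
import Mathlib
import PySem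

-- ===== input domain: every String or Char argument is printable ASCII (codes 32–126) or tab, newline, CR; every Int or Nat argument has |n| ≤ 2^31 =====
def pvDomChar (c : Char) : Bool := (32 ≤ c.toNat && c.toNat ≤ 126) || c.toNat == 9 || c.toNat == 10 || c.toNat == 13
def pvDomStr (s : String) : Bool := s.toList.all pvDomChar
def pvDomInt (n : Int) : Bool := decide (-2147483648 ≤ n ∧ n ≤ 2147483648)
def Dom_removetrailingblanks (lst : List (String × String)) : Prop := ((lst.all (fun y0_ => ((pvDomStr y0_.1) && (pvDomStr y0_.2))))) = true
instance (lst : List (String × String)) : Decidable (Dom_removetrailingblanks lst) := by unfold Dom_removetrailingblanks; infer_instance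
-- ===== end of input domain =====

-- B replaces A's boolean-flag accumulator loop by finding the first non-blank cut
-- index in the reversed list and slicing (simpler decomposition, same O(n) cost).
-- Python A and B both reverse `lst` in place; the theorems here are about the
-- RETURN value only (the mutation is identical in both).

-- ===== PORT A =====
-- literal port: reverse, fold carrying (new_lst, trailing), reverse the result
-- pvStepA is the body of A's for-loop (one iteration on state (new_lst, trailing))
def pvStepA (st : List (String × String) × Bool) (p : String × String) : List (String × String) × Bool :=
  if st.2 then
    if p.2 ≠ "" then (st.1 ++ [p], false)
    else st
  else (st.1 ++ [p], st.2)

def removetrailingblanks (lst : List (String × String)) : List (String × String) :=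
  let rev := lst.reverse
  let st := rev.foldl pvStepA ([], true)
  st.1.reverse

-- ===== PORT B =====
-- literal port of Source B: reverse, find first non-blank index (= dropWhile the
-- blank prefix of the reversed list), slice from it, reverse the slice
def removetrailingblanks_alt (lst : List (String × String)) : List (String × String) :=
  let rev := lst.reverse
  let result := rev.dropWhile (fun p => p.2 == "")
  result.reverse

-- ===== PRECONDITION & SPEC =====
def Spec_removetrailingblanks (lst : List (String × String)) (out : List (String × String)) : Prop := out = removetrailingblanks_alt lst
instance (lst : List (String × String)) (out : List (String × String)) : Decidable (Spec_removetrailingblanks lst out) := by unfold Spec_removetrailingblanks; infer_instance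

-- ===== CLAIM (what is proved, stated in full; the proofs are below) =====
def Claim_equal_removetrailingblanks : Prop := ∀ (lst : List (String × String)), Dom_removetrailingblanks lst → Spec_removetrailingblanks lst (removetrailingblanks lst)

-- ===== LEMMAS AND PROOFS =====

-- once `trailing` is false A's loop appends every remaining element
theorem pv_fold_false (l acc : List (String × String)) :
    l.foldl pvStepA (acc, false) = (acc ++ l, false) := by
  induction l generalizing acc with
  | nil => simp
  | cons p t ih => simp [List.foldl, pvStepA, ih]

-- A's loop from ([], true) computes exactly the dropWhile of the blank prefix
theorem pv_fold_true (l : List (String × String)) :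
    (l.foldl pvStepA ([], true)).1 = l.dropWhile (fun p => p.2 == "") := by
  induction l with
  | nil => simp
  | cons p t ih =>
    by_cases h : p.2 = ""
    · simpa [List.foldl, List.dropWhile, pvStepA, h] using ih
    · simp [List.foldl, List.dropWhile, pvStepA, h, pv_fold_false, beq_eq_false_iff_ne.mpr h]

-- ===== VERDICT (by name: the statement is the Claim_ definition above) =====
theorem removetrailingblanks_spec : Claim_equal_removetrailingblanks := by
  intro lst _
  unfold Spec_removetrailingblanks removetrailingblanks removetrailingblanks_alt
  simp only []
  rw [pv_fold_true]
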